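-- pv_equiv track=rewrite | github.com/DSXiangLi/Leetcode_python- | level1.py | answer1
-- ===== SOURCE A (Python) =====
-- def answer1(mystr):
--     count = 1
--     for gr in range(1, int(len(mystr)/2+1)):
--         if (len(mystr)%gr ==0):
--             flag =True
--             for i in range(gr,len(mystr)):
--                 if mystr[i%gr] != mystr[i]:
--                     flag = False
--                     break
--             if flag:
--                 count = int(len(mystr)/gr)
--                 break
--     return count
-- ===== SOURCE B (Python) =====
-- def answer1(mystr):
--     n = len(mystr)
--     for k in range(n, 1, -1):
--         if n % k == 0 and mystr[:n // k] * k == mystr: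
--             return k
--     return 1
-- ===== Notes on version B (the rewrite author's own statement) =====
-- stated objective: alternative
-- what changed: B searches repetition counts k descending from n and tests each candidate with one repeated-prefix string comparison (mystr[:n//k]*k == mystr), instead of A's ascending block-size search with a per-character modular-index inner loop.
import Mathlib
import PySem

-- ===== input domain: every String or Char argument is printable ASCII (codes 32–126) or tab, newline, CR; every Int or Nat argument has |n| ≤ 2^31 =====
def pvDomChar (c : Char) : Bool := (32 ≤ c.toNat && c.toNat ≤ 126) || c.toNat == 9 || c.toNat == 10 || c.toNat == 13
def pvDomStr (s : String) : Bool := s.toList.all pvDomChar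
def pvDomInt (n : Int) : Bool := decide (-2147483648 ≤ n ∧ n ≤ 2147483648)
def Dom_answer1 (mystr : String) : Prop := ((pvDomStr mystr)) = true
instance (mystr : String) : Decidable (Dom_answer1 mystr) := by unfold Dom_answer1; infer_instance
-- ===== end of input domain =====

-- B searches repetition counts k descending from n and compares the repeated prefix with the string,
-- instead of A's ascending block-size search with a modular-index character loop (objective: alternative).


-- ===== PORT A =====
-- for gr in range(1, n//2+1): if n%gr==0 and all chars match their i%gr partner, return n//gr (break); else 1
def answer1 (mystr : String) : Int :=
  match (List.range' 1 (mystr.toList.length / 2)).find? (fun gr =>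
      mystr.toList.length % gr == 0 &&
        (List.range' gr (mystr.toList.length - gr)).all
          (fun i => mystr.toList[i % gr]? == mystr.toList[i]?)) with
  | some gr => (↑(mystr.toList.length / gr) : Int)
  | none => 1

-- ===== PORT B =====
-- for k in range(n, 1, -1): if n%k==0 and mystr[:n//k]*k == mystr: return k; return 1
def answer1_alt (mystr : String) : Int :=
  match ((List.range' 2 (mystr.toList.length - 1)).reverse).find? (fun k =>
      mystr.toList.length % k == 0 &&
        (List.replicate k (mystr.toList.take (mystr.toList.length / k))).flatten == mystr.toList) with
  | some k => (↑k : Int)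
  | none => 1

-- ===== PRECONDITION & SPEC =====
def Spec_answer1 (mystr : String) (out : Int) : Prop := out = answer1_alt mystr
instance (mystr : String) (out : Int) : Decidable (Spec_answer1 mystr out) := by unfold Spec_answer1; infer_instance

-- ===== CLAIM (what is proved, stated in full; the proofs are below) =====
def Claim_equal_answer1 : Prop := ∀ (mystr : String), Dom_answer1 mystr → Spec_answer1 mystr (answer1 mystr)

-- ===== LEMMAS AND PROOFS =====

-- find-first-with-break equals head of filter
theorem pv_find?_eq_head?_filter {α : Type} (p : α → Bool) (l : List α) :
    l.find? p = (l.filter p).head? := by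
  induction l with
  | nil => rfl
  | cons a t ih =>
    cases hpa : p a
    · rw [List.find?_cons_of_neg (by simp [hpa]), List.filter_cons_of_neg (by simp [hpa]), ih]
    · rw [List.find?_cons_of_pos (by simp [hpa]), List.filter_cons_of_pos (by simp [hpa]),
        List.head?_cons]

-- indexing into a flattened replicate is indexing modulo the block length
theorem pv_flat_get (t : List Char) :
    ∀ (k j : Nat), j < k * t.length → ((List.replicate k t).flatten)[j]? = t[j % t.length]? := by
  intro k
  induction k with
  | zero => intro j hj; omega
  | succ k ih =>
    intro j hj
    rw [List.replicate_succ, List.flatten_cons]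
    by_cases hlt : j < t.length
    · rw [List.getElem?_append_left hlt, Nat.mod_eq_of_lt hlt]
    · have hle : t.length ≤ j := by omega
      have hj' : j < k * t.length + t.length := by rw [Nat.succ_mul] at hj; exact hj
      rw [List.getElem?_append_right hle, ih (j - t.length) (by omega)]
      congr 1
      conv_rhs => rw [show j = t.length + (j - t.length) by omega]
      rw [Nat.add_mod_left]

-- A's modular character check equals B's repeated-prefix equality, for a dividing block size
theorem pv_period_iff (l : List Char) (d : Nat) (hd : 0 < d) (hle : d ≤ l.length)
    (hdvd : d ∣ l.length) :
    ((List.range' d (l.length - d)).all (fun i => l[i % d]? == l[i]?) = true) ↔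
      ((List.replicate (l.length / d) (l.take d)).flatten = l) := by
  have htlen : (l.take d).length = d := by simp [List.length_take]; omega
  have hmul : (l.length / d) * d = l.length := Nat.div_mul_cancel hdvd
  have hlen : (List.replicate (l.length / d) (l.take d)).flatten.length = l.length := by
    simp [List.length_flatten, List.map_replicate, htlen, List.sum_replicate, smul_eq_mul, hmul]
  have hget : ∀ j, j < l.length → ((List.replicate (l.length / d) (l.take d)).flatten)[j]? = l[j % d]? := by
    intro j hj
    rw [pv_flat_get (l.take d) _ j (by rw [htlen, hmul]; exact hj), htlen]
    rw [List.getElem?_take_of_lt (Nat.mod_lt _ hd)]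
  constructor
  · intro hall
    apply List.ext_getElem?
    intro j
    by_cases hj : j < l.length
    · rw [hget j hj]
      by_cases hjd : j < d
      · rw [Nat.mod_eq_of_lt hjd]
      · have : l[j % d]? == l[j]? := by
          rw [List.all_eq_true] at hall
          exact hall j (by rw [List.mem_range'_1]; omega)
        exact eq_of_beq this
    · rw [List.getElem?_eq_none (le_of_not_gt hj), List.getElem?_eq_none (by
        rw [hlen]; exact le_of_not_gt hj)]
  · intro heq
    rw [List.all_eq_true]
    intro i hi
    rw [List.mem_range'_1] at hi
    have hi' : i < l.length := by omega
    have := hget i hi'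
    rw [heq] at this
    rw [← this]
    exact beq_self_eq_true _

-- a valid repetition count k of B corresponds to the valid block size l.length / k of A
theorem pv_cand_iff (l : List Char) (k : Nat) :
    ((2 ≤ k ∧ k ≤ l.length) ∧
        (l.length % k == 0 && (List.replicate k (l.take (l.length / k))).flatten == l) = true) ↔
      (∃ d, (1 ≤ d ∧ d ≤ l.length / 2) ∧
        (l.length % d == 0 &&
          (List.range' d (l.length - d)).all (fun i => l[i % d]? == l[i]?)) = true ∧
        l.length / d = k) := by
  constructor
  · rintro ⟨⟨h2k, hkn⟩, hq⟩
    rw [Bool.and_eq_true, beq_iff_eq, beq_iff_eq] at hq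
    obtain ⟨hmod, hflat⟩ := hq
    have hkdvd : k ∣ l.length := Nat.dvd_of_mod_eq_zero hmod
    have hn0 : l.length ≠ 0 := by omega
    have hd1 : 1 ≤ l.length / k := by
      rw [Nat.le_div_iff_mul_le (by omega : 0 < k)]; omega
    have hmulk : (l.length / k) * k = l.length := Nat.div_mul_cancel hkdvd
    have hd2 : l.length / k ≤ l.length / 2 := by
      rw [Nat.le_div_iff_mul_le (by omega : (0:ℕ) < 2)]
      calc (l.length / k) * 2 ≤ (l.length / k) * k := Nat.mul_le_mul_left _ h2k
        _ = l.length := hmulk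
    have hddvd : l.length / k ∣ l.length := Nat.div_dvd_of_dvd hkdvd
    refine ⟨l.length / k, ⟨hd1, hd2⟩, ?_, Nat.div_div_self hkdvd hn0⟩
    rw [Bool.and_eq_true, beq_iff_eq]
    refine ⟨Nat.mod_eq_zero_of_dvd hddvd, ?_⟩
    apply (pv_period_iff l (l.length / k) (by omega) (Nat.div_le_self _ _) hddvd).mpr
    rw [Nat.div_div_self hkdvd hn0]
    exact hflat
  · rintro ⟨d, ⟨hd1, hd2⟩, hp, hdk⟩
    rw [Bool.and_eq_true, beq_iff_eq] at hp
    obtain ⟨hmod, hall⟩ := hp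
    have hddvd : d ∣ l.length := Nat.dvd_of_mod_eq_zero hmod
    have h2d : d * 2 ≤ l.length := (Nat.le_div_iff_mul_le (by omega : (0:ℕ) < 2)).mp hd2
    have hn0 : l.length ≠ 0 := by omega
    subst hdk
    have h2k : 2 ≤ l.length / d := by
      rw [Nat.le_div_iff_mul_le (by omega : 0 < d)]; omega
    have hkdvd : l.length / d ∣ l.length := Nat.div_dvd_of_dvd hddvd
    refine ⟨⟨h2k, Nat.div_le_self _ _⟩, ?_⟩
    rw [Bool.and_eq_true, beq_iff_eq, beq_iff_eq]
    refine ⟨Nat.mod_eq_zero_of_dvd hkdvd, ?_⟩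
    rw [Nat.div_div_self hddvd hn0]
    exact (pv_period_iff l d (by omega) (by omega) hddvd).mp hall

-- the two filtered candidate lists correspond under d ↦ n / d
theorem pv_lists_eq (l : List Char) :
    (((List.range' 2 (l.length - 1)).reverse).filter (fun k =>
        l.length % k == 0 && (List.replicate k (l.take (l.length / k))).flatten == l)) =
      (((List.range' 1 (l.length / 2)).filter (fun gr =>
        l.length % gr == 0 && (List.range' gr (l.length - gr)).all (fun i => l[i % gr]? == l[i]?))).map
        (fun d => l.length / d)) := by
  have hmem : ∀ a : ℕ,
      (a ∈ ((List.range' 2 (l.length - 1)).reverse).filter (fun k =>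
        l.length % k == 0 && (List.replicate k (l.take (l.length / k))).flatten == l)) ↔
      a ∈ (((List.range' 1 (l.length / 2)).filter (fun gr =>
        l.length % gr == 0 && (List.range' gr (l.length - gr)).all (fun i => l[i % gr]? == l[i]?))).map
        (fun d => l.length / d)) := by
    intro a
    simp only [List.mem_filter, List.mem_reverse, List.mem_range'_1, List.mem_map]
    constructor
    · rintro ⟨⟨h1, h2⟩, hq⟩
      obtain ⟨d, ⟨hd1, hd2⟩, hp, hdk⟩ := (pv_cand_iff l a).mp ⟨⟨h1, by omega⟩, hq⟩
      exact ⟨d, ⟨⟨hd1, by omega⟩, hp⟩, hdk⟩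
    · rintro ⟨d, ⟨⟨hd1, hd2⟩, hp⟩, hdk⟩
      obtain ⟨⟨h2a, han⟩, hq⟩ := (pv_cand_iff l a).mpr ⟨d, ⟨hd1, by omega⟩, hp, hdk⟩
      exact ⟨⟨h2a, by omega⟩, hq⟩
  have hnod1 : (((List.range' 2 (l.length - 1)).reverse).filter (fun k =>
      l.length % k == 0 && (List.replicate k (l.take (l.length / k))).flatten == l)).Nodup :=
    (List.nodup_reverse.mpr (List.nodup_range')).filter _
  have hnod2 : ((((List.range' 1 (l.length / 2)).filter (fun gr =>
      l.length % gr == 0 && (List.range' gr (l.length - gr)).all (fun i => l[i % gr]? == l[i]?))).map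
      (fun d => l.length / d))).Nodup := by
    apply List.Nodup.map_on _ ((List.nodup_range').filter _)
    intro x hx y hy hxy
    rw [List.mem_filter, List.mem_range'_1] at hx hy
    obtain ⟨⟨hx1, hx2⟩, hpx⟩ := hx
    obtain ⟨⟨hy1, hy2⟩, hpy⟩ := hy
    rw [Bool.and_eq_true] at hpx hpy
    have hxdvd : x ∣ l.length := Nat.dvd_of_mod_eq_zero (by simpa using hpx.1)
    have hydvd : y ∣ l.length := Nat.dvd_of_mod_eq_zero (by simpa using hpy.1)
    have hn0 : l.length ≠ 0 := by
      rcases Nat.eq_zero_or_pos l.length with h | h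
      · simp [h] at hx2; omega
      · omega
    calc x = l.length / (l.length / x) := (Nat.div_div_self hxdvd hn0).symm
      _ = l.length / (l.length / y) := by rw [hxy]
      _ = y := Nat.div_div_self hydvd hn0
  have hpair1 : (((List.range' 2 (l.length - 1)).reverse).filter (fun k =>
      l.length % k == 0 && (List.replicate k (l.take (l.length / k))).flatten == l)).Pairwise
      (fun a b => b ≤ a) := by
    apply List.Pairwise.filter
    rw [List.pairwise_reverse]
    exact (List.pairwise_lt_range' 1).imp (fun h => Nat.le_of_lt h)
  have hpair2 : ((((List.range' 1 (l.length / 2)).filter (fun gr =>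
      l.length % gr == 0 && (List.range' gr (l.length - gr)).all (fun i => l[i % gr]? == l[i]?))).map
      (fun d => l.length / d))).Pairwise (fun a b => b ≤ a) := by
    rw [List.pairwise_map]
    apply List.Pairwise.imp_of_mem (fun {a b} ha hb hab =>
      Nat.div_le_div_left (Nat.le_of_lt hab) ?_) ((List.pairwise_lt_range' 1).filter _)
    rw [List.mem_filter, List.mem_range'_1] at ha
    omega
  exact ((List.perm_ext_iff_of_nodup hnod1 hnod2).mpr hmem).eq_of_pairwise
    (fun a b _ _ h1 h2 => Nat.le_antisymm h2 h1) hpair1 hpair2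

-- ===== VERDICT (by name: the statement is the Claim_ definition above) =====
theorem answer1_spec : Claim_equal_answer1 := by
  intro mystr _
  unfold Spec_answer1 answer1 answer1_alt
  rw [pv_find?_eq_head?_filter, pv_find?_eq_head?_filter, pv_lists_eq, List.head?_map]
  cases (((List.range' 1 (mystr.toList.length / 2)).filter _).head?) <;> simp
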